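-- pv_equiv track=rewrite | github.com/MartinYUU/W6_Exercises | Functions/name_game.py | trunc_name
-- ===== SOURCE A (Python) =====
-- vowels = ['a', 'e', 'i', 'o', 'u']
--
-- def trunc_name(name):
--     name = name.lower()
--     game_name = ''
--     first_vowel_pos = 0
--     for i in name:
--         if i in vowels:
--             first_vowel_pos = name.find(i)
--             break
--     game_name = name[first_vowel_pos:]
--     return game_name
-- ===== SOURCE B (Python) =====
-- vowels = ['a', 'e', 'i', 'o', 'u']
--
-- def trunc_name(name):
--     name = name.lower()
--     positions = [p for p in (name.find(v) for v in vowels) if p != -1]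
--     if positions:
--         return name[min(positions):]
--     return name
-- ===== Notes on version B (the rewrite author's own statement) =====
-- stated objective: alternative
-- what changed: Instead of A's single character-by-character scan that breaks at the first vowel, B loops over the fixed vowel alphabet, computes each vowel's first index with find, and slices at the minimum of the found positions (whole string if none found).
import Mathlib
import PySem

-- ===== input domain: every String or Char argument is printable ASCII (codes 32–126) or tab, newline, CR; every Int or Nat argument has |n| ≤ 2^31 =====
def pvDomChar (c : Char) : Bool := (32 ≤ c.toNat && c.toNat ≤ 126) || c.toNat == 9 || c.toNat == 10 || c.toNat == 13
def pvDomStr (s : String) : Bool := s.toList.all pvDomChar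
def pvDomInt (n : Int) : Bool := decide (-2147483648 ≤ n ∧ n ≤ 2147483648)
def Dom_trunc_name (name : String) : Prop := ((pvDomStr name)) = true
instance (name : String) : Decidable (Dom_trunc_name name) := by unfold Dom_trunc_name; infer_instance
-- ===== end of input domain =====

-- B replaces A's character-by-character scan-and-break with a loop over the fixed vowel
-- alphabet: each vowel's first index via find, then a slice at the minimum found position
-- (whole lowered string when no vowel occurs). Objective: alternative decomposition, same cost.


-- ===== PORT A =====
-- vowels = ['a', 'e', 'i', 'o', 'u']  (module constant; 'i in vowels' on a 1-char string is char membership)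
def pvVowels : List Char := ['a', 'e', 'i', 'o', 'u']

-- A's for-loop: scan the characters, on the first vowel set first_vowel_pos = name.find(i) and break
def pvLoopA (nm : String) : List Char → Int
  | [] => 0
  | c :: rest => if c ∈ pvVowels then PySem.Str.find nm (String.ofList [c]) else pvLoopA nm rest

def trunc_name (name : String) : String :=
  let nm := PySem.Str.lower name
  let first_vowel_pos := pvLoopA nm nm.toList
  PySem.Str.slice nm (some first_vowel_pos) none

-- ===== PORT B =====
def trunc_name_alt (name : String) : String :=
  let nm := PySem.Str.lower name
  let positions :=
    (pvVowels.map (fun v => PySem.Str.find nm (String.ofList [v]))).filter (fun p => p != -1)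
  match PySem.List.min? positions id with
  | some m => PySem.Str.slice nm (some m) none
  | none => nm

-- ===== PRECONDITION & SPEC =====
def Spec_trunc_name (name : String) (out : String) : Prop := out = trunc_name_alt name
instance (name : String) (out : String) : Decidable (Spec_trunc_name name out) := by unfold Spec_trunc_name; infer_instance

-- ===== CLAIM (what is proved, stated in full; the proofs are below) =====
def Claim_equal_trunc_name : Prop := ∀ (name : String), Dom_trunc_name name → Spec_trunc_name name (trunc_name name)

-- ===== LEMMAS AND PROOFS =====

-- [c] is a prefix of l iff l starts with c
theorem pv_singleton_prefix (c : Char) (l : List Char) : ([c] <+: l) ↔ l.head? = some c := by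
  cases l <;> simp [List.cons_prefix_cons, eq_comm]

-- first occurrence: find of a single character not occurring in the prefix
theorem pv_find_first_occ (pre rest : List Char) (c : Char) (hc : c ∉ pre) :
    PySem.Chars.find (pre ++ c :: rest) [c] = (pre.length : Int) := by
  set s := pre ++ c :: rest with hs
  have hmem : c ∈ s := by simp [hs]
  have hnn : 0 ≤ PySem.Chars.find s [c] := by
    rw [PySem.Chars.find_nonneg_iff]
    exact (List.singleton_infix_iff c s).mpr hmem
  obtain ⟨hpre, hmin⟩ := PySem.Chars.find_spec hnn
  set k := (PySem.Chars.find s [c]).toNat with hk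
  have hgetk : s[k]? = some c := by
    have := (pv_singleton_prefix c (List.drop k s)).mp hpre
    rwa [List.head?_drop] at this
  have hkp : k = pre.length := by
    rcases lt_trichotomy k pre.length with h | h | h
    · exfalso
      have : s[k]? = pre[k]? := by
        rw [hs]; exact List.getElem?_append_left h
      rw [this] at hgetk
      exact hc (List.mem_of_getElem? hgetk)
    · exact h
    · exfalso
      apply hmin pre.length h
      rw [pv_singleton_prefix, List.head?_drop, hs]
      simp
  omega

-- A's loop skips a vowel-free prefix of the iterated characters
theorem pv_loopA_skip (nm : String) (pre t : List Char) (h : ∀ c ∈ pre, c ∉ pvVowels) :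
    pvLoopA nm (pre ++ t) = pvLoopA nm t := by
  induction pre with
  | nil => rfl
  | cons c cs ih =>
    have hc := h c (by simp)
    simp only [List.cons_append, pvLoopA, if_neg hc]
    exact ih (fun d hd => h d (by simp [hd]))

-- every accepted position points at a vowel of s, hence lies at or after the first vowel
theorem pv_position_ge (s : List Char) (pre rest : List Char) (c : Char)
    (hs : s = pre ++ c :: rest) (hpre : ∀ d ∈ pre, d ∉ pvVowels) (_hc : c ∈ pvVowels)
    (v : Char) (hv : v ∈ pvVowels) (hne : PySem.Chars.find s [v] ≠ -1) :
    (pre.length : Int) ≤ PySem.Chars.find s [v] := by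
  have hnn : 0 ≤ PySem.Chars.find s [v] := by
    rcases (PySem.Chars.neg_one_le_find s [v]).lt_or_eq with h | h
    · omega
    · exact absurd h.symm hne
  obtain ⟨hpref, -⟩ := PySem.Chars.find_spec hnn
  set k := (PySem.Chars.find s [v]).toNat with hk
  have hgetk : s[k]? = some v := by
    have := (pv_singleton_prefix v (List.drop k s)).mp hpref
    rwa [List.head?_drop] at this
  by_contra hlt
  have hklt : k < pre.length := by omega
  have : s[k]? = pre[k]? := by rw [hs]; exact List.getElem?_append_left hklt
  rw [this] at hgetk
  exact hpre v (List.mem_of_getElem? hgetk) hv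

-- the core equality, on the already-lowered string nm
theorem pv_core (nm : String) :
    PySem.Str.slice nm (some (pvLoopA nm nm.toList)) none =
    (match PySem.List.min?
        ((pvVowels.map (fun v => PySem.Str.find nm (String.ofList [v]))).filter
          (fun p => p != -1)) id with
     | some m => PySem.Str.slice nm (some m) none
     | none => nm) := by
  set s := nm.toList with hsdef
  set pre := s.takeWhile (fun c => !decide (c ∈ pvVowels)) with hpre
  set suf := s.dropWhile (fun c => !decide (c ∈ pvVowels)) with hsuf
  have hsplit : s = pre ++ suf := (List.takeWhile_append_dropWhile).symm
  have hprenv : ∀ d ∈ pre, d ∉ pvVowels := by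
    intro d hd
    have := List.mem_takeWhile_imp hd
    simpa using this
  cases hsufc : suf with
  | nil =>
    -- no vowel in s: loop returns 0, every find is -1
    have hnv : ∀ d ∈ s, d ∉ pvVowels := by
      intro d hd
      exact hprenv d (by rw [hsplit, hsufc, List.append_nil] at hd; exact hd)
    have hfind : ∀ v ∈ pvVowels, PySem.Chars.find s [v] = -1 := by
      intro v hv
      rw [PySem.Chars.find_eq_neg_one_iff]
      intro hinf
      exact hnv v ((List.singleton_infix_iff v s).mp hinf) hv
    have hfilter :
        ((pvVowels.map (fun v => PySem.Str.find nm (String.ofList [v]))).filter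
          (fun p => p != -1)) = [] := by
      rw [List.filter_eq_nil_iff]
      intro p hp
      obtain ⟨v, hv, hpv⟩ := List.mem_map.mp hp
      have : PySem.Str.find nm (String.ofList [v]) = -1 := by
        simp only [PySem.Str.find]
        have hl : (String.ofList [v]).toList = [v] := by simp
        rw [hl, ← hsdef]
        exact hfind v hv
      subst hpv
      simpa using this
    have hloop : pvLoopA nm s = 0 := by
      have := pv_loopA_skip nm s [] (by simpa using hnv)
      simpa using this
    rw [hloop, hfilter]
    simp only [PySem.List.min?, List.foldl_nil]
    apply String.toList_inj.mp
    simp [PySem.Str.slice, pysem, ← hsdef]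
  | cons c rest =>
    have hc : c ∈ pvVowels := by
      have := List.head?_dropWhile_not (fun c => !decide (c ∈ pvVowels)) s
      rw [← hsuf, hsufc] at this
      simpa using this
    have hsplit' : s = pre ++ c :: rest := by rw [hsplit, hsufc]
    have hcnpre : c ∉ pre := fun h => hprenv c h hc
    -- A's side
    have hloop : pvLoopA nm s = (pre.length : Int) := by
      rw [hsplit', pv_loopA_skip nm pre (c :: rest) hprenv]
      simp only [pvLoopA, if_pos hc, PySem.Str.find]
      have : (String.ofList [c]).toList = [c] := by simp
      rw [this, ← hsdef, hsplit']
      exact pv_find_first_occ pre rest c hcnpre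
    -- B's side
    set positions :=
      ((pvVowels.map (fun v => PySem.Str.find nm (String.ofList [v]))).filter
        (fun p => p != -1)) with hpos
    have hfindc : PySem.Str.find nm (String.ofList [c]) = (pre.length : Int) := by
      simp only [PySem.Str.find]
      have : (String.ofList [c]).toList = [c] := by simp
      rw [this, ← hsdef, hsplit']
      exact pv_find_first_occ pre rest c hcnpre
    have hmemp : (pre.length : Int) ∈ positions := by
      rw [hpos, List.mem_filter]
      constructor
      · exact List.mem_map.mpr ⟨c, hc, hfindc⟩
      · simp
    have hge : ∀ p ∈ positions, (pre.length : Int) ≤ p := by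
      intro p hp
      rw [hpos, List.mem_filter] at hp
      obtain ⟨hp1, hp2⟩ := hp
      obtain ⟨v, hv, hpv⟩ := List.mem_map.mp hp1
      have hpv' : PySem.Chars.find s [v] = p := by
        simp only [PySem.Str.find] at hpv
        have : (String.ofList [v]).toList = [v] := by simp
        rw [this, ← hsdef] at hpv
        exact hpv
      rw [← hpv']
      exact pv_position_ge s pre rest c hsplit' hprenv hc v hv
        (by rw [hpv']; simpa using hp2)
    cases hmq : PySem.List.min? positions id with
    | none =>
      exact absurd ((PySem.List.min?_eq_none_iff positions id).mp hmq ▸ hmemp)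
        (List.not_mem_nil)
    | some m =>
      have h1 : m ≤ (pre.length : Int) := PySem.List.min?_isMin hmq _ hmemp
      have h2 : (pre.length : Int) ≤ m := hge m (PySem.List.min?_mem hmq)
      have : m = (pre.length : Int) := le_antisymm h1 h2
      rw [hloop, this]

-- ===== VERDICT (by name: the statement is the Claim_ definition above) =====
theorem trunc_name_spec : Claim_equal_trunc_name := by
  intro name _
  unfold Spec_trunc_name trunc_name trunc_name_alt
  exact pv_core (PySem.Str.lower name)
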